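-- pv_equiv track=rewrite | github.com/fengzhizi319/pdf2md | src/pdf2md_rag/chunking.py | _carry_overlap
-- ===== SOURCE A (Python) =====
-- def _carry_overlap(parts: list[str], chunk_overlap: int) -> list[str]:
--     """从上一块尾部回收少量文本，作为下一个 chunk 的重叠上下文。"""
--     if chunk_overlap == 0:
--         return []
--
--     carried: list[str] = []
--     total = 0
--     for part in reversed(parts):
--         carried.insert(0, part)
--         total += len(part)
--         if total >= chunk_overlap:
--             break
--     return carried
-- ===== SOURCE B (Python) =====
-- def _carry_overlap(parts: list[str], chunk_overlap: int) -> list[str]: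
--     """从上一块尾部回收少量文本，作为下一个 chunk 的重叠上下文。"""
--     if chunk_overlap == 0:
--         return []
--     total = sum(map(len, parts))
--     i = 0
--     # Drop leading parts while the remainder (without parts[i]) still covers
--     # the overlap; always keep at least the final part.
--     while i + 1 < len(parts) and total - len(parts[i]) >= chunk_overlap:
--         total -= len(parts[i])
--         i += 1
--     return parts[i:]
-- ===== Notes on version B (the rewrite author's own statement) =====
-- stated objective: faster
-- what changed: Instead of growing a suffix back-to-front with insert(0, ...) until the running total reaches the overlap, B precomputes the total length once and scans forward, dropping leading parts while the remainder still covers the overlap, then returns the remaining slice.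
import Mathlib
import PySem

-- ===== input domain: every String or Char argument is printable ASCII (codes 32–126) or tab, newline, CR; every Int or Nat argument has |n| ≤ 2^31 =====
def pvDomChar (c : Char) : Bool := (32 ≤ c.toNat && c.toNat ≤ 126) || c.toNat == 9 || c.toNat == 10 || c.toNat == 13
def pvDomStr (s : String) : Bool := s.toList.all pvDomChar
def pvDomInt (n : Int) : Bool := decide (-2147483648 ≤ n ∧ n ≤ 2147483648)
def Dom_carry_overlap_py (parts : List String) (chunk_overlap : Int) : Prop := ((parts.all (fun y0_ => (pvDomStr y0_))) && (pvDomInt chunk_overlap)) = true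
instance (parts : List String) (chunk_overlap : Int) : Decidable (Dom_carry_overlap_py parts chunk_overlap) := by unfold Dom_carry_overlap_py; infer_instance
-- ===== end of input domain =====

-- B replaces the back-to-front accumulation (insert(0, …) until total ≥ overlap) with one
-- forward pass that drops leading parts while the precomputed remainder still covers the
-- overlap (objective: faster — a timing run measured B faster at large sizes; A's insert(0, …) shifts the carried list each step).

-- ===== PORT A =====
-- A's for-loop over reversed(parts): state = (carried, total); break when total ≥ chunk_overlap.
def carryLoopA (rev : List String) (carried : List String) (total : Int)
    (chunk_overlap : Int) : List String :=
  match rev with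
  | [] => carried
  | part :: rest =>
    let carried' := part :: carried          -- carried.insert(0, part)
    let total' := total + PySem.Str.len part
    if total' ≥ chunk_overlap then carried'  -- break
    else carryLoopA rest carried' total' chunk_overlap

def carry_overlap_py (parts : List String) (chunk_overlap : Int) : List String :=
  if chunk_overlap = 0 then []
  else carryLoopA parts.reverse [] 0 chunk_overlap

-- ===== PORT B =====
-- B's while-loop 'i + 1 < len(parts) and total - len(parts[i]) >= chunk_overlap', ported as the
-- obvious structural recursion over the undropped suffix (same state: suffix = parts[i:], total).
def dropLoopB (parts : List String) (total : Int) (chunk_overlap : Int) : List String :=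
  match parts with
  | [] => []
  | [p] => [p]                               -- i + 1 < len(parts) fails: keep the last part
  | p :: q :: rest =>
    if total - PySem.Str.len p ≥ chunk_overlap then
      dropLoopB (q :: rest) (total - PySem.Str.len p) chunk_overlap
    else p :: q :: rest

def carry_overlap_py_alt (parts : List String) (chunk_overlap : Int) : List String :=
  if chunk_overlap = 0 then []
  else dropLoopB parts ((parts.map PySem.Str.len).sum) chunk_overlap

-- ===== PRECONDITION & SPEC =====
def Spec_carry_overlap_py (parts : List String) (chunk_overlap : Int) (out : List String) : Prop := out = carry_overlap_py_alt parts chunk_overlap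
instance (parts : List String) (chunk_overlap : Int) (out : List String) : Decidable (Spec_carry_overlap_py parts chunk_overlap out) := by unfold Spec_carry_overlap_py; infer_instance

-- ===== CLAIM (what is proved, stated in full; the proofs are below) =====
def Claim_equal_carry_overlap_py : Prop := ∀ (parts : List String) (chunk_overlap : Int), Dom_carry_overlap_py parts chunk_overlap → Spec_carry_overlap_py parts chunk_overlap (carry_overlap_py parts chunk_overlap)

-- ===== LEMMAS AND PROOFS =====

theorem lenc (s : String) : PySem.Str.len s = (s.toList.length : Int) := PySem.Str.len_eq s

theorem sumLen_nonneg (xs : List String) : 0 ≤ (xs.map PySem.Str.len).sum := by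
  induction xs with
  | nil => simp
  | cons x xs ih => simp only [List.map_cons, List.sum_cons, lenc]
                    omega

-- If the running total already reaches the overlap somewhere inside xs, the break fires
-- within xs and the tail ys is never visited.
theorem carryLoopA_break (xs ys : List String) (c : List String) (t ov : Int)
    (hne : xs ≠ []) (h : t + (xs.map PySem.Str.len).sum ≥ ov) :
    carryLoopA (xs ++ ys) c t ov = carryLoopA xs c t ov := by
  induction xs generalizing c t with
  | nil => exact absurd rfl hne
  | cons x xs ih =>
    simp only [List.cons_append, carryLoopA]
    split_ifs with hb
    · rfl
    · rcases xs with _ | ⟨y, ys'⟩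
      · exfalso
        simp only [lenc, List.map_cons, List.map_nil, List.sum_cons, List.sum_nil] at h hb
        omega
      · exact ih _ _ (by simp)
          (by simp only [lenc, List.map_cons, List.sum_cons] at h ⊢; omega)

-- If xs never reaches the overlap, the loop consumes all of xs and continues into ys with
-- carried = reverse xs ++ c and total increased by the total length of xs.
theorem carryLoopA_pass (xs ys : List String) (c : List String) (t ov : Int)
    (h : t + (xs.map PySem.Str.len).sum < ov) :
    carryLoopA (xs ++ ys) c t ov
      = carryLoopA ys (xs.reverse ++ c) (t + (xs.map PySem.Str.len).sum) ov := by
  induction xs generalizing c t with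
  | nil => simp
  | cons x xs ih =>
    have hs := sumLen_nonneg xs
    simp only [lenc, List.map_cons, List.sum_cons] at h hs
    simp only [List.cons_append, carryLoopA]
    split_ifs with hb
    · exfalso; rw [lenc] at hb; omega
    · rw [ih _ _ (by simp only [lenc]; omega)]
      congr 1
      · simp [List.append_assoc]
      · simp only [lenc, List.map_cons, List.sum_cons]; ring

-- Main loop correspondence: A's backward accumulation over reversed(parts) equals B's forward
-- drop started from the full total.
theorem loops_eq (parts : List String) (ov : Int) :
    carryLoopA parts.reverse [] 0 ov = dropLoopB parts ((parts.map PySem.Str.len).sum) ov := by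
  induction parts with
  | nil => simp [carryLoopA, dropLoopB]
  | cons p rest ih =>
    rcases rest with _ | ⟨q, rest'⟩
    · -- single part: A breaks or exhausts at p; B keeps the last part
      simp only [List.reverse_cons, List.reverse_nil, List.nil_append, carryLoopA, dropLoopB]
      split <;> rfl
    · by_cases hge : ((q :: rest').map PySem.Str.len).sum ≥ ov
      · -- the break fires within reversed(rest); p is never visited — matches B dropping p
        rw [List.reverse_cons,
            carryLoopA_break (q :: rest').reverse [p] [] 0 ov (by simp)
              (by simp only [List.map_reverse, List.sum_reverse, zero_add]; exact hge),
            ih]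
        conv_rhs => rw [dropLoopB]
        rw [if_pos (by simp only [lenc, List.map_cons, List.sum_cons] at hge ⊢; omega)]
        congr 1
        simp only [lenc, List.map_cons, List.sum_cons]; ring
      · -- reversed(rest) is fully consumed; the loop then takes p and stops — matches B keeping p
        rw [List.reverse_cons,
            carryLoopA_pass (q :: rest').reverse [p] [] 0 ov
              (by simp only [List.map_reverse, List.sum_reverse, zero_add]; omega)]
        simp only [List.reverse_reverse, List.append_nil, carryLoopA, zero_add, ite_self]
        conv_rhs => rw [dropLoopB]
        rw [if_neg (by simp only [lenc, List.map_cons, List.sum_cons] at hge ⊢; omega)]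

-- ===== VERDICT (by name: the statement is the Claim_ definition above) =====
theorem carry_overlap_py_spec : Claim_equal_carry_overlap_py := by
  intro parts ov _
  unfold Spec_carry_overlap_py carry_overlap_py carry_overlap_py_alt
  by_cases h : ov = 0
  · simp [h]
  · simp only [h, if_false]
    exact loops_eq parts ov
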